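-- pv_equiv track=rewrite | github.com/SIA-77/Industrial-Cybersecurity-Risk-Calculator | backend/risk_engine.py | resolve_criteria_group
-- ===== SOURCE A (Python) =====
-- def _normalize_key(value):
--     return "".join(ch.lower() for ch in value if ch.isalnum())
--
-- def resolve_criteria_group(criteria_name, group_scores, config):
--     aliases = config.get("criteria_aliases", {})
--     candidates = [criteria_name] + aliases.get(criteria_name, [])
--     normalized = {_normalize_key(name): name for name in group_scores.keys()}
--     for candidate in candidates:
--         key = _normalize_key(candidate)
--         if key in normalized:
--             return normalized[key]
--     return None
-- ===== SOURCE B (Python) =====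
-- def _normalize_key(value):
--     return "".join(ch.lower() for ch in value if ch.isalnum())
--
-- def resolve_criteria_group(criteria_name, group_scores, config):
--     aliases = config.get("criteria_aliases", {})
--     ranks = [_normalize_key(c) for c in [criteria_name, *aliases.get(criteria_name, [])]]
--     best = None
--     for name in group_scores:
--         try:
--             i = ranks.index(_normalize_key(name))
--         except ValueError:
--             continue
--         if best is None or i < best[0]:
--             best = (i, name)
--     return None if best is None else best[1]
-- ===== Notes on version B (the rewrite author's own statement) =====
-- stated objective: alternative
-- what changed: Inverts the loop nesting: instead of building a normalized-key dict and probing it per candidate, B makes a single pass over the score keys, keeping the key whose normalized form has the lowest candidate rank; Pre_ excludes inputs where two distinct score keys share a normalized form, on which A's last-insertion-wins dict overwrite is accidental (B keeps the first such key).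
-- outside the precondition, e.g. on resolve_criteria_group('a', {'A': 1, 'a!': 2}, {}): A returns 'a!', B returns 'A'
import Mathlib
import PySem

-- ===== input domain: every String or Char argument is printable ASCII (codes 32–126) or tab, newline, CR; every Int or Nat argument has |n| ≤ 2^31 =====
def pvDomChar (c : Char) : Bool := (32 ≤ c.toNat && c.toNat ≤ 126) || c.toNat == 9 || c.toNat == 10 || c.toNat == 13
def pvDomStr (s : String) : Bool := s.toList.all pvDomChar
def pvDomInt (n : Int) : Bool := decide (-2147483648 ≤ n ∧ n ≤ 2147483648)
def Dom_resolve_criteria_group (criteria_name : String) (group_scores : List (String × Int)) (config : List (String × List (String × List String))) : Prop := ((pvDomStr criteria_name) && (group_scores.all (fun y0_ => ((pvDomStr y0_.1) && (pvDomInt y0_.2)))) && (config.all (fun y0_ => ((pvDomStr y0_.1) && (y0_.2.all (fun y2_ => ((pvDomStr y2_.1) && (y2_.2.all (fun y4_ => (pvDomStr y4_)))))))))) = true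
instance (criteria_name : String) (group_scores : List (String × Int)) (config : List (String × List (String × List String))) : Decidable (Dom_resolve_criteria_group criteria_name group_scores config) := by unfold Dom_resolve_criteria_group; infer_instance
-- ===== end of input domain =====

-- B inverts the loop nesting: one pass over the score keys keeping the key of lowest candidate
-- rank (objective: alternative). Pre_ excludes inputs where two distinct score keys share a
-- normalized form, on which A's last-insertion-wins dict overwrite is accidental.


-- ===== PORT A =====
-- _normalize_key: "".join(ch.lower() for ch in value if ch.isalnum())
def pvNormKey (value : String) : String :=
  String.ofList ((value.toList.filter PySem.Chars.isalnum).map PySem.Chars.lowerChar)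

-- for candidate in candidates: if key in normalized: return normalized[key]
def pvALoop (normalized : PySem.Dict String String) : List String → Option String
  | [] => none
  | candidate :: rest =>
    let key := pvNormKey candidate
    if normalized.contains key then normalized.get? key
    else pvALoop normalized rest

def resolve_criteria_group (criteria_name : String) (group_scores : List (String × Int)) (config : List (String × List (String × List String))) : Option String :=
  let aliases := (PySem.Dict.ofList config).getD "criteria_aliases" []
  let candidates := criteria_name :: (PySem.Dict.ofList aliases).getD criteria_name []
  let normalized := (PySem.Dict.ofList group_scores).keys.foldl
    (fun d name => d.insert (pvNormKey name) name) PySem.Dict.empty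
  pvALoop normalized candidates

-- ===== PORT B =====
-- loop body: i = ranks.index(_normalize_key(name)); keep (i, name) if i beats the best so far
def pvBStep (ranks : List String) (best : Option (Nat × String)) (name : String) : Option (Nat × String) :=
  match PySem.List.index? ranks (pvNormKey name) with
  | none => best
  | some i =>
    match best with
    | none => some (i, name)
    | some (j, m) => if i < j then some (i, name) else some (j, m)

def resolve_criteria_group_alt (criteria_name : String) (group_scores : List (String × Int)) (config : List (String × List (String × List String))) : Option String :=
  let aliases := (PySem.Dict.ofList config).getD "criteria_aliases" []
  let ranks := (criteria_name :: (PySem.Dict.ofList aliases).getD criteria_name []).map pvNormKey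
  match (PySem.Dict.ofList group_scores).keys.foldl (pvBStep ranks) none with
  | none => none
  | some (_, m) => some m

-- ===== PRECONDITION & SPEC =====
-- Pre_ excludes inputs where two distinct score keys share a normalized form: there A's
-- last-insertion-wins dict overwrite is accidental (B keeps the first such key instead).
def Pre_resolve_criteria_group (criteria_name : String) (group_scores : List (String × Int)) (config : List (String × List (String × List String))) : Prop :=
  (((PySem.Dict.ofList group_scores).keys.map pvNormKey).Nodup)
instance (criteria_name : String) (group_scores : List (String × Int)) (config : List (String × List (String × List String))) : Decidable (Pre_resolve_criteria_group criteria_name group_scores config) := by unfold Pre_resolve_criteria_group; infer_instance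

def pvWitness_resolve_criteria_group : String × (List (String × Int)) × (List (String × List (String × List String))) :=
  ("Safety!", [("safety", 3), ("impact", 1)], [("criteria_aliases", [("Safety!", ["impact"])])])

def Spec_resolve_criteria_group (criteria_name : String) (group_scores : List (String × Int)) (config : List (String × List (String × List String))) (out : Option String) : Prop := out = resolve_criteria_group_alt criteria_name group_scores config
instance (criteria_name : String) (group_scores : List (String × Int)) (config : List (String × List (String × List String))) (out : Option String) : Decidable (Spec_resolve_criteria_group criteria_name group_scores config out) := by unfold Spec_resolve_criteria_group; infer_instance

-- ===== CLAIM =====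
def Claim_equal_resolve_criteria_group : Prop := ∀ (criteria_name : String) (group_scores : List (String × Int)) (config : List (String × List (String × List String))), Dom_resolve_criteria_group criteria_name group_scores config → Pre_resolve_criteria_group criteria_name group_scores config → Spec_resolve_criteria_group criteria_name group_scores config (resolve_criteria_group criteria_name group_scores config)

-- ===== LEMMAS AND PROOFS =====

-- proof-side characterizations ------------------------------------------------

-- last score key normalizing to `key` (what A's dict comprehension stores)
def pvLast (key : String) (names : List String) : Option String :=
  names.foldl (fun m name => if pvNormKey name = key then some name else m) none

-- first score key normalizing to `key`
def pvFirst (key : String) : List String → Option String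
  | [] => none
  | n :: ns => if pvNormKey n = key then some n else pvFirst key ns

-- A as a candidate-major loop with a last-match scan
def pvLastLoop (names : List String) : List String → Option String
  | [] => none
  | c :: rest =>
    match pvLast (pvNormKey c) names with
    | some m => some m
    | none => pvLastLoop names rest

-- the same with a first-match scan
def pvFirstLoop (names : List String) : List String → Option String
  | [] => none
  | c :: rest =>
    match pvFirst (pvNormKey c) names with
    | some m => some m
    | none => pvFirstLoop names rest

-- B's fold as a right recursion (head wins ties, matching foldl's strict <)
def pvAmin (ranks : List String) : List String → Option (Nat × String)
  | [] => none
  | n :: ns =>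
    match PySem.List.index? ranks (pvNormKey n) with
    | none => pvAmin ranks ns
    | some i =>
      match pvAmin ranks ns with
      | none => some (i, n)
      | some (j, m) => if i ≤ j then some (i, n) else some (j, m)

def pvMerge (acc r : Option (Nat × String)) : Option (Nat × String) :=
  match acc, r with
  | none, r => r
  | acc, none => acc
  | some (j, m), some (i, x) => if i < j then some (i, x) else some (j, m)

-- A-side: lookup in the normalization dict = last-match scan of the key list
theorem pvGet_foldl_insert (names : List String) (d : PySem.Dict String String) (key : String) :
    ((names.foldl (fun d name => d.insert (pvNormKey name) name) d).get? key)
      = names.foldl (fun m name => if pvNormKey name = key then some name else m) (d.get? key) := by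
  induction names generalizing d with
  | nil => rfl
  | cons n rest ih =>
    simp only [List.foldl_cons, ih, PySem.Dict.get?_insert]
    by_cases h : pvNormKey n = key
    · simp [h]
    · rw [if_neg h, if_neg (fun hx => h hx.symm)]

theorem pvA_eq_lastLoop (names : List String) (cands : List String) :
    pvALoop (names.foldl (fun d name => d.insert (pvNormKey name) name) PySem.Dict.empty) cands
      = pvLastLoop names cands := by
  induction cands with
  | nil => rfl
  | cons c rest ih =>
    simp only [pvALoop, pvLastLoop, ih, pvLast]
    rw [PySem.Dict.contains_eq_isSome_get?, pvGet_foldl_insert, PySem.Dict.get?_empty]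
    cases hm : names.foldl (fun m name => if pvNormKey name = pvNormKey c then some name else m) none <;>
      simp

-- B-side: the foldl is pvMerge of the accumulator with pvAmin
theorem pvFoldl_eq_merge_amin (ranks : List String) (names : List String) (acc : Option (Nat × String)) :
    names.foldl (pvBStep ranks) acc = pvMerge acc (pvAmin ranks names) := by
  induction names generalizing acc with
  | nil => cases acc <;> rfl
  | cons n ns ih =>
    simp only [List.foldl_cons, ih, pvAmin]
    cases hi : PySem.List.index? ranks (pvNormKey n) with
    | none => simp only [pvBStep, hi]
    | some i =>
      cases acc with
      | none =>
        simp only [pvBStep, hi, pvMerge]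
        cases hr : pvAmin ranks ns with
        | none => rfl
        | some p =>
          obtain ⟨j, m⟩ := p
          by_cases hij : i ≤ j
          · simp [hij, Nat.not_lt.mpr hij]
          · simp [hij, Nat.lt_of_not_le hij]
      | some p =>
        obtain ⟨k, a⟩ := p
        simp only [pvBStep, hi]
        cases hr : pvAmin ranks ns with
        | none =>
          by_cases hik : i < k <;> simp [pvMerge, hik]
        | some q =>
          obtain ⟨j, m⟩ := q
          by_cases hik : i < k <;> by_cases hij : i ≤ j <;> by_cases hjk : j < k <;>
            simp [pvMerge, hik, hij, hjk] <;> omega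

theorem pvAmin_nil (names : List String) : pvAmin [] names = none := by
  induction names with
  | nil => rfl
  | cons n ns ih =>
    have hi : PySem.List.index? ([] : List String) (pvNormKey n) = none := rfl
    simp only [pvAmin, hi, ih]

theorem pvAmin_cons (c : String) (rest : List String) (names : List String) :
    pvAmin (c :: rest) names
      = match pvFirst c names with
        | some m => some (0, m)
        | none => (pvAmin rest names).map (fun p => (p.1 + 1, p.2)) := by
  induction names with
  | nil => rfl
  | cons n ns ih =>
    by_cases h : pvNormKey n = c
    · have hi : PySem.List.index? (c :: rest) (pvNormKey n) = some 0 := by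
        rw [h]; exact PySem.List.index?_cons_self c rest
      simp only [pvAmin, hi, ih, pvFirst, if_pos h]
      cases hf : pvFirst c ns with
      | some m => simp
      | none =>
        cases hr : pvAmin rest ns with
        | none => simp
        | some p => simp
    · have hi : PySem.List.index? (c :: rest) (pvNormKey n)
          = (PySem.List.index? rest (pvNormKey n)).map (· + 1) := by
        exact PySem.List.index?_cons_of_ne rest (Ne.symm h)
      simp only [pvAmin, hi, ih, pvFirst, if_neg h]
      cases hf : pvFirst c ns with
      | some m =>
        cases hj : PySem.List.index? rest (pvNormKey n) with
        | none => simp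
        | some j => simp
      | none =>
        cases hj : PySem.List.index? rest (pvNormKey n) with
        | none => simp
        | some j =>
          cases hr : pvAmin rest ns with
          | none => simp
          | some p =>
            obtain ⟨k, m⟩ := p
            by_cases hjk : j ≤ k
            · simp [hjk, Nat.succ_le_succ hjk]
            · have : ¬ (j + 1 ≤ k + 1) := by omega
              simp [hjk, this]

theorem pvSnd_amin_eq_firstLoop (names : List String) (cands : List String) :
    Option.map Prod.snd (pvAmin (cands.map pvNormKey) names) = pvFirstLoop names cands := by
  induction cands with
  | nil => simp [pvAmin_nil, pvFirstLoop]
  | cons c cs ih =>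
    simp only [List.map_cons, pvFirstLoop, pvAmin_cons]
    cases hf : pvFirst (pvNormKey c) names with
    | some m => simp
    | none =>
      simp only [← ih, Option.map_map]
      rfl

-- with distinct normalized score keys, the last match is the first match
theorem pvFoldl_const_of_no_match (key : String) (ns : List String) (acc : Option String)
    (h : ∀ x ∈ ns, pvNormKey x ≠ key) :
    ns.foldl (fun m name => if pvNormKey name = key then some name else m) acc = acc := by
  induction ns generalizing acc with
  | nil => rfl
  | cons n ns ih =>
    simp only [List.foldl_cons, if_neg (h n (List.mem_cons_self))]
    exact ih acc (fun x hx => h x (List.mem_cons_of_mem _ hx))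

theorem pvLast_eq_first (key : String) (names : List String)
    (hnd : (names.map pvNormKey).Nodup) :
    pvLast key names = pvFirst key names := by
  induction names with
  | nil => rfl
  | cons n ns ih =>
    simp only [List.map_cons, List.nodup_cons] at hnd
    simp only [pvLast, pvFirst, List.foldl_cons]
    by_cases h : pvNormKey n = key
    · simp only [if_pos h]
      exact pvFoldl_const_of_no_match key ns (some n)
        (fun x hx hxk => hnd.1 (by rw [h, ← hxk]; exact List.mem_map_of_mem hx))
    · simp only [if_neg h]
      exact ih hnd.2

theorem pvLastLoop_eq_firstLoop (names : List String) (cands : List String)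
    (hnd : (names.map pvNormKey).Nodup) :
    pvLastLoop names cands = pvFirstLoop names cands := by
  induction cands with
  | nil => rfl
  | cons c cs ih =>
    simp only [pvLastLoop, pvFirstLoop, pvLast_eq_first _ _ hnd, ih]

-- ===== VERDICT =====
theorem resolve_criteria_group_spec : Claim_equal_resolve_criteria_group := by
  intro cn gs cfg _ hpre
  unfold Spec_resolve_criteria_group
  simp only [resolve_criteria_group, resolve_criteria_group_alt]
  rw [pvA_eq_lastLoop, pvLastLoop_eq_firstLoop _ _ hpre, ← pvSnd_amin_eq_firstLoop,
    pvFoldl_eq_merge_amin]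
  cases (pvAmin ((cn :: (PySem.Dict.ofList ((PySem.Dict.ofList cfg).getD "criteria_aliases" [])).getD cn []).map pvNormKey) (PySem.Dict.ofList gs).keys) with
  | none => rfl
  | some p => obtain ⟨i, m⟩ := p; rfl
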